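-- pv_equiv track=rewrite | github.com/vladisnut/codetester | src/utils/general.py | string_to_json
-- ===== SOURCE A (Python) =====
-- def string_to_json(s: str) -> str:
--     REPLACE_LIST = {
--         "'": '"',
--         "None": "null",
--         "True": "true",
--         "False": "false",
--     }
--     for key, value in REPLACE_LIST.items():
--         s = s.replace(key, value)
--
--     return s
-- ===== SOURCE B (Python) =====
-- def string_to_json(s: str) -> str:
--     out = []
--     i = 0
--     n = len(s)
--     while i < n:
--         c = s[i]
--         if c == "'":
--             out.append('"'); i += 1
--         elif c == 'N' and s.startswith('one', i + 1):
--             out.append('null'); i += 4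
--         elif c == 'T' and s.startswith('rue', i + 1):
--             out.append('true'); i += 4
--         elif c == 'F' and s.startswith('alse', i + 1):
--             out.append('false'); i += 5
--         else:
--             out.append(c); i += 1
--     return ''.join(out)
-- ===== Notes on version B (the rewrite author's own statement) =====
-- stated objective: alternative
-- what changed: Replaces four sequential full-string str.replace passes by a single left-to-right scan that matches each token (', None, True, False) once and emits its replacement, exploiting that the tokens and replacements are mutually non-interfering.
import Mathlib
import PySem

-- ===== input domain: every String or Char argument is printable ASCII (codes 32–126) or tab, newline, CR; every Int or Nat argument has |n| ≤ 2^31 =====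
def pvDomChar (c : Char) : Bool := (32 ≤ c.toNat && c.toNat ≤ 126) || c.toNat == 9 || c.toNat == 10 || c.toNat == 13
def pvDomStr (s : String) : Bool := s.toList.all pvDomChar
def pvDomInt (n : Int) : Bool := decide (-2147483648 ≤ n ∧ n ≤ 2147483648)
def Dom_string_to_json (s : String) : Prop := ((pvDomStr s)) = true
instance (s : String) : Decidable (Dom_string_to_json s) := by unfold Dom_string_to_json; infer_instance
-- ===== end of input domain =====

-- B replaces A's four sequential str.replace passes by one left-to-right scan; objective: alternative (same cost class).

-- ===== PORT A =====
def string_to_json (s : String) : String :=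
  let s1 := PySem.Str.replace s "'" "\""
  let s2 := PySem.Str.replace s1 "None" "null"
  let s3 := PySem.Str.replace s2 "True" "true"
  PySem.Str.replace s3 "False" "false"

-- ===== PORT B =====
-- single pass over the characters, matching the four tokens in Source B's order
def scanJson : List Char → List Char
  | [] => []
  | c :: t =>
    if c = '\'' then '\"' :: scanJson t
    else if c = 'N' ∧ ['o','n','e'].isPrefixOf t then
      'n' :: 'u' :: 'l' :: 'l' :: scanJson (t.drop 3)
    else if c = 'T' ∧ ['r','u','e'].isPrefixOf t then
      't' :: 'r' :: 'u' :: 'e' :: scanJson (t.drop 3)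
    else if c = 'F' ∧ ['a','l','s','e'].isPrefixOf t then
      'f' :: 'a' :: 'l' :: 's' :: 'e' :: scanJson (t.drop 4)
    else c :: scanJson t
termination_by l => l.length
decreasing_by
  all_goals (simp [List.length_drop]; try omega)

def string_to_json_alt (s : String) : String := String.ofList (scanJson s.toList)

-- ===== PRECONDITION & SPEC =====
def Spec_string_to_json (s : String) (out : String) : Prop := out = string_to_json_alt s
instance (s : String) (out : String) : Decidable (Spec_string_to_json s out) := by unfold Spec_string_to_json; infer_instance

-- ===== CLAIM (what is proved, stated in full; the proofs are below) =====
def Claim_equal_string_to_json : Prop := ∀ (s : String), Dom_string_to_json s → Spec_string_to_json s (string_to_json s)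

-- ===== LEMMAS AND PROOFS =====

-- proof helper: simple-recursion form of one replace pass with nonempty token o :: rest
def replS (o : Char) (rest new : List Char) : List Char → List Char
  | [] => []
  | c :: t =>
    if c = o ∧ rest.isPrefixOf t then new ++ replS o rest new (t.drop rest.length)
    else c :: replS o rest new t
termination_by l => l.length
decreasing_by
  all_goals (simp [List.length_drop]; try omega)

theorem replS_nil (o : Char) (rest new : List Char) : replS o rest new [] = [] := by
  simp [replS]

theorem replS_cons_ne (o : Char) (rest new : List Char) {c : Char} (t : List Char)
    (hc : c ≠ o) : replS o rest new (c :: t) = c :: replS o rest new t := by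
  rw [replS]; simp [hc]

theorem replS_match (o : Char) (rest new t : List Char) (h : rest <+: t) :
    replS o rest new (o :: t) = new ++ replS o rest new (t.drop rest.length) := by
  rw [replS]; simp [List.isPrefixOf_iff_prefix.mpr h]

theorem replS_cons_not_prefix (o : Char) (rest new : List Char) {c : Char} {t : List Char}
    (h : ¬ rest <+: t) : replS o rest new (c :: t) = c :: replS o rest new t := by
  rw [replS]
  rw [if_neg]
  rintro ⟨-, hp⟩
  exact h (List.isPrefixOf_iff_prefix.mp hp)

theorem replS_passthrough (o : Char) (rest new : List Char) (cs x : List Char)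
    (h : ∀ c ∈ cs, c ≠ o) : replS o rest new (cs ++ x) = cs ++ replS o rest new x := by
  induction cs with
  | nil => rfl
  | cons a cs ih =>
    have ha : a ≠ o := h a (by simp)
    simp only [List.cons_append, replS_cons_ne o rest new _ ha]
    rw [ih (fun c hc => h c (by simp [hc]))]

-- prefix tokens whose characters avoid both the search head and the replacement head are untouched by the pass
theorem replS_prefix_iff (o d : Char) (rest ds : List Char) (tok : List Char)
    (h : ∀ ch ∈ tok, ch ≠ o ∧ ch ≠ d) (x : List Char) :
    tok <+: replS o rest (d :: ds) x ↔ tok <+: x := by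
  induction tok generalizing x with
  | nil => simp
  | cons a tok ih =>
    have ha := h a (by simp)
    cases x with
    | nil => simp [replS_nil]
    | cons c t =>
      by_cases hp : rest <+: t
      · by_cases hco : c = o
        · subst hco
          rw [replS_match c rest (d :: ds) t hp]
          constructor
          · intro hq; exact absurd (List.cons_prefix_cons.mp hq).1 ha.2
          · intro hq; exact absurd (List.cons_prefix_cons.mp hq).1 ha.1
        · rw [replS_cons_ne o rest (d :: ds) t hco, List.cons_prefix_cons, List.cons_prefix_cons]
          exact and_congr_right fun _ => ih (fun ch hch => h ch (by simp [hch])) t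
      · rw [replS_cons_not_prefix o rest (d :: ds) hp, List.cons_prefix_cons, List.cons_prefix_cons]
        exact and_congr_right fun _ => ih (fun ch hch => h ch (by simp [hch])) t

-- Chars.replace.go agrees with replS once the fuel covers the list
theorem go_eq_replS (o : Char) (rest new : List Char) :
    ∀ (fuel : Nat) (l acc : List Char), l.length ≤ fuel →
      PySem.Chars.replace.go (o :: rest) new fuel l acc = acc.reverse ++ replS o rest new l := by
  intro fuel
  induction fuel with
  | zero =>
    intro l acc hl
    have : l = [] := List.eq_nil_of_length_eq_zero (Nat.le_zero.mp hl)
    subst this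
    simp [PySem.Chars.replace.go, replS_nil]
  | succ fuel ih =>
    intro l acc hl
    cases l with
    | nil => simp [PySem.Chars.replace.go, replS_nil]
    | cons c t =>
      rw [PySem.Chars.replace.go]
      by_cases hp : (o :: rest).isPrefixOf (c :: t)
      · obtain ⟨rfl, hpre⟩ : o = c ∧ rest <+: t := by
          simpa [List.isPrefixOf_iff_prefix, List.cons_prefix_cons] using hp
        rw [if_pos (by simpa [List.isPrefixOf_iff_prefix, List.cons_prefix_cons] using hpre),
            replS_match o rest new t hpre]
        have hdrop : (o :: rest).length = rest.length + 1 := by simp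
        rw [hdrop, List.drop_succ_cons,
            ih (t.drop rest.length) (new.reverse ++ acc) (by simp at hl ⊢; omega)]
        simp
      · rw [if_neg hp, ih t (c :: acc) (by simp at hl ⊢; omega)]
        have hne : ¬ (c = o ∧ rest <+: t) := by
          rintro ⟨rfl, hpre⟩
          exact hp (by simpa [List.isPrefixOf_iff_prefix, List.cons_prefix_cons] using hpre)
        have : replS o rest new (c :: t) = c :: replS o rest new t := by
          rw [replS]
          rw [if_neg]
          rintro ⟨h1, h2⟩
          exact hne ⟨h1, List.isPrefixOf_iff_prefix.mp h2⟩
        rw [this]; simp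

theorem replace_eq_replS (o : Char) (rest new l : List Char) :
    PySem.Chars.replace l (o :: rest) new = replS o rest new l := by
  rw [PySem.Chars.replace]
  simp only [List.isEmpty_cons, Bool.false_eq_true, if_false]
  exact go_eq_replS o rest new l.length l [] (le_refl _)

-- the composed four passes equal the single scan
set_option maxRecDepth 8192 in
theorem chain_eq_scan (l : List Char) :
    replS 'F' ['a','l','s','e'] ['f','a','l','s','e']
      (replS 'T' ['r','u','e'] ['t','r','u','e']
        (replS 'N' ['o','n','e'] ['n','u','l','l']
          (replS '\'' [] ['\"'] l))) = scanJson l := by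
  fun_induction scanJson l with
  | case1 => simp [replS_nil]
  | case2 t ih =>
    rw [replS_match '\'' [] ['\"'] t (List.nil_prefix)]
    simp only [List.length_nil, List.drop_zero, List.singleton_append]
    rw [replS_cons_ne 'N' _ _ _ (by simp),
        replS_cons_ne 'T' _ _ _ (by simp),
        replS_cons_ne 'F' _ _ _ (by simp), ih]
  | case3 c t hq h ih =>
    obtain ⟨rfl, hpre⟩ := h
    obtain ⟨t', rfl⟩ := List.isPrefixOf_iff_prefix.mp hpre
    simp only [List.cons_append, List.nil_append] at ih ⊢
    simp only [List.drop_succ_cons, List.drop_zero] at ih ⊢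
    have e1 : replS '\'' [] ['\"'] ('N'::'o'::'n'::'e'::t')
        = 'N'::'o'::'n'::'e'::replS '\'' [] ['\"'] t' :=
      replS_passthrough '\'' [] ['\"'] ['N','o','n','e'] t' (by simp)
    have e2 : replS 'N' ['o','n','e'] ['n','u','l','l'] ('N'::'o'::'n'::'e'::replS '\'' [] ['\"'] t')
        = 'n'::'u'::'l'::'l'::replS 'N' ['o','n','e'] ['n','u','l','l'] (replS '\'' [] ['\"'] t') :=
      replS_match 'N' ['o','n','e'] ['n','u','l','l'] ('o'::'n'::'e'::replS '\'' [] ['\"'] t')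
        ⟨replS '\'' [] ['\"'] t', rfl⟩
    have e3 : ∀ x : List Char, replS 'T' ['r','u','e'] ['t','r','u','e'] ('n'::'u'::'l'::'l'::x)
        = 'n'::'u'::'l'::'l'::replS 'T' ['r','u','e'] ['t','r','u','e'] x :=
      fun x => replS_passthrough 'T' ['r','u','e'] ['t','r','u','e'] ['n','u','l','l'] x (by simp)
    have e4 : ∀ x : List Char, replS 'F' ['a','l','s','e'] ['f','a','l','s','e'] ('n'::'u'::'l'::'l'::x)
        = 'n'::'u'::'l'::'l'::replS 'F' ['a','l','s','e'] ['f','a','l','s','e'] x :=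
      fun x => replS_passthrough 'F' ['a','l','s','e'] ['f','a','l','s','e'] ['n','u','l','l'] x (by simp)
    rw [e1, e2, e3, e4, ih]
  | case4 c t hq hn h ih =>
    obtain ⟨rfl, hpre⟩ := h
    obtain ⟨t', rfl⟩ := List.isPrefixOf_iff_prefix.mp hpre
    simp only [List.cons_append, List.nil_append] at ih ⊢
    simp only [List.drop_succ_cons, List.drop_zero] at ih ⊢
    have e1 : replS '\'' [] ['\"'] ('T'::'r'::'u'::'e'::t')
        = 'T'::'r'::'u'::'e'::replS '\'' [] ['\"'] t' :=
      replS_passthrough '\'' [] ['\"'] ['T','r','u','e'] t' (by simp)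
    have e2 : replS 'N' ['o','n','e'] ['n','u','l','l'] ('T'::'r'::'u'::'e'::replS '\'' [] ['\"'] t')
        = 'T'::'r'::'u'::'e'::replS 'N' ['o','n','e'] ['n','u','l','l'] (replS '\'' [] ['\"'] t') :=
      replS_passthrough 'N' ['o','n','e'] ['n','u','l','l'] ['T','r','u','e'] _ (by simp)
    have e3 : replS 'T' ['r','u','e'] ['t','r','u','e']
          ('T'::'r'::'u'::'e'::replS 'N' ['o','n','e'] ['n','u','l','l'] (replS '\'' [] ['\"'] t'))
        = 't'::'r'::'u'::'e'::replS 'T' ['r','u','e'] ['t','r','u','e']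
            (replS 'N' ['o','n','e'] ['n','u','l','l'] (replS '\'' [] ['\"'] t')) :=
      replS_match 'T' ['r','u','e'] ['t','r','u','e'] _
        ⟨replS 'N' ['o','n','e'] ['n','u','l','l'] (replS '\'' [] ['\"'] t'), rfl⟩
    have e4 : ∀ x : List Char, replS 'F' ['a','l','s','e'] ['f','a','l','s','e'] ('t'::'r'::'u'::'e'::x)
        = 't'::'r'::'u'::'e'::replS 'F' ['a','l','s','e'] ['f','a','l','s','e'] x :=
      fun x => replS_passthrough 'F' ['a','l','s','e'] ['f','a','l','s','e'] ['t','r','u','e'] x (by simp)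
    rw [e1, e2, e3, e4, ih]
  | case5 c t hq hn ht h ih =>
    obtain ⟨rfl, hpre⟩ := h
    obtain ⟨t', rfl⟩ := List.isPrefixOf_iff_prefix.mp hpre
    simp only [List.cons_append, List.nil_append] at ih ⊢
    simp only [List.drop_succ_cons, List.drop_zero] at ih ⊢
    have e1 : replS '\'' [] ['\"'] ('F'::'a'::'l'::'s'::'e'::t')
        = 'F'::'a'::'l'::'s'::'e'::replS '\'' [] ['\"'] t' :=
      replS_passthrough '\'' [] ['\"'] ['F','a','l','s','e'] t' (by simp)
    have e2 : replS 'N' ['o','n','e'] ['n','u','l','l'] ('F'::'a'::'l'::'s'::'e'::replS '\'' [] ['\"'] t')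
        = 'F'::'a'::'l'::'s'::'e'::replS 'N' ['o','n','e'] ['n','u','l','l'] (replS '\'' [] ['\"'] t') :=
      replS_passthrough 'N' ['o','n','e'] ['n','u','l','l'] ['F','a','l','s','e'] _ (by simp)
    have e3 : replS 'T' ['r','u','e'] ['t','r','u','e']
          ('F'::'a'::'l'::'s'::'e'::replS 'N' ['o','n','e'] ['n','u','l','l'] (replS '\'' [] ['\"'] t'))
        = 'F'::'a'::'l'::'s'::'e'::replS 'T' ['r','u','e'] ['t','r','u','e']
            (replS 'N' ['o','n','e'] ['n','u','l','l'] (replS '\'' [] ['\"'] t')) :=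
      replS_passthrough 'T' ['r','u','e'] ['t','r','u','e'] ['F','a','l','s','e'] _ (by simp)
    have e4 : replS 'F' ['a','l','s','e'] ['f','a','l','s','e']
          ('F'::'a'::'l'::'s'::'e'::replS 'T' ['r','u','e'] ['t','r','u','e']
            (replS 'N' ['o','n','e'] ['n','u','l','l'] (replS '\'' [] ['\"'] t')))
        = 'f'::'a'::'l'::'s'::'e'::replS 'F' ['a','l','s','e'] ['f','a','l','s','e']
            (replS 'T' ['r','u','e'] ['t','r','u','e']
              (replS 'N' ['o','n','e'] ['n','u','l','l'] (replS '\'' [] ['\"'] t'))) :=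
      replS_match 'F' ['a','l','s','e'] ['f','a','l','s','e'] _
        ⟨replS 'T' ['r','u','e'] ['t','r','u','e']
          (replS 'N' ['o','n','e'] ['n','u','l','l'] (replS '\'' [] ['\"'] t')), rfl⟩
    rw [e1, e2, e3, e4, ih]
  | case6 c t hq hn ht hf ih =>
    rw [replS_cons_ne '\'' _ _ _ hq]
    have hRN : replS 'N' ['o','n','e'] ['n','u','l','l'] (c :: replS '\'' [] ['\"'] t)
        = c :: replS 'N' ['o','n','e'] ['n','u','l','l'] (replS '\'' [] ['\"'] t) := by
      by_cases hcN : c = 'N'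
      · refine replS_cons_not_prefix _ _ _ ?_
        intro hp
        exact hn ⟨hcN, List.isPrefixOf_iff_prefix.mpr
          ((replS_prefix_iff '\'' '\"' [] [] ['o','n','e'] (by simp) t).mp hp)⟩
      · exact replS_cons_ne _ _ _ _ hcN
    rw [hRN]
    have hRT : replS 'T' ['r','u','e'] ['t','r','u','e']
          (c :: replS 'N' ['o','n','e'] ['n','u','l','l'] (replS '\'' [] ['\"'] t))
        = c :: replS 'T' ['r','u','e'] ['t','r','u','e']
            (replS 'N' ['o','n','e'] ['n','u','l','l'] (replS '\'' [] ['\"'] t)) := by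
      by_cases hcT : c = 'T'
      · refine replS_cons_not_prefix _ _ _ ?_
        intro hp
        exact ht ⟨hcT, List.isPrefixOf_iff_prefix.mpr
          ((replS_prefix_iff '\'' '\"' [] [] ['r','u','e'] (by simp) t).mp
            ((replS_prefix_iff 'N' 'n' ['o','n','e'] ['u','l','l'] ['r','u','e'] (by simp) _).mp hp))⟩
      · exact replS_cons_ne _ _ _ _ hcT
    rw [hRT]
    have hRF : replS 'F' ['a','l','s','e'] ['f','a','l','s','e']
          (c :: replS 'T' ['r','u','e'] ['t','r','u','e']
            (replS 'N' ['o','n','e'] ['n','u','l','l'] (replS '\'' [] ['\"'] t)))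
        = c :: replS 'F' ['a','l','s','e'] ['f','a','l','s','e']
            (replS 'T' ['r','u','e'] ['t','r','u','e']
              (replS 'N' ['o','n','e'] ['n','u','l','l'] (replS '\'' [] ['\"'] t))) := by
      by_cases hcF : c = 'F'
      · refine replS_cons_not_prefix _ _ _ ?_
        intro hp
        exact hf ⟨hcF, List.isPrefixOf_iff_prefix.mpr
          ((replS_prefix_iff '\'' '\"' [] [] ['a','l','s','e'] (by simp) t).mp
            ((replS_prefix_iff 'N' 'n' ['o','n','e'] ['u','l','l'] ['a','l','s','e'] (by simp) _).mp
              ((replS_prefix_iff 'T' 't' ['r','u','e'] ['r','u','e'] ['a','l','s','e'] (by simp) _).mp hp)))⟩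
      · exact replS_cons_ne _ _ _ _ hcF
    rw [hRF, ih]

-- ===== VERDICT (by name: the statement is the Claim_ definition above) =====
theorem string_to_json_spec : Claim_equal_string_to_json := by
  intro s _
  unfold Spec_string_to_json string_to_json string_to_json_alt
  simp only [PySem.Str.replace]
  rw [String.toList_ofList, String.toList_ofList, String.toList_ofList]
  rw [show ("'" : String).toList = ['\''] from rfl,
      show ("\"" : String).toList = ['\"'] from rfl,
      show ("None" : String).toList = ['N','o','n','e'] from rfl,
      show ("null" : String).toList = ['n','u','l','l'] from rfl,
      show ("True" : String).toList = ['T','r','u','e'] from rfl,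
      show ("true" : String).toList = ['t','r','u','e'] from rfl,
      show ("False" : String).toList = ['F','a','l','s','e'] from rfl,
      show ("false" : String).toList = ['f','a','l','s','e'] from rfl]
  rw [replace_eq_replS, replace_eq_replS, replace_eq_replS, replace_eq_replS,
      chain_eq_scan]
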